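-- pv_equiv track=rewrite | github.com/johnyejin/Algorithm_python | 2020-04-week1/[2020]li_1.py | solution
-- ===== SOURCE A (Python) =====
-- def solution(inputString):
--     answer = 0  # 총 괄호 쌍의 수
--     stack1 = []
--     stack2 = []
--     stack3 = []
--     stack4 = []
--
--     for i in range(len(inputString)):
--         if inputString[i] == '(':
--             stack1.append('(')
--         elif inputString[i] == ')':
--             if len(stack1) == 0: return -1
--             stack1.pop()
--             answer += 1
--
--         elif inputString[i] == '{':
--             stack2.append('{')
--         elif inputString[i] == '}':
--             if len(stack2) == 0: return -1
--             stack2.pop()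
--             answer += 1
--
--         elif inputString[i] == '[':
--             stack3.append('[')
--         elif inputString[i] == ']':
--             if len(stack3) == 0: return -1
--             stack3.pop()
--             answer += 1
--
--         elif inputString[i] == '<':
--             stack4.append('<')
--         elif inputString[i] == '>':
--             if len(stack4) == 0: return -1
--             stack4.pop()
--             answer += 1
--
--     return answer
-- ===== SOURCE B (Python) =====
-- def solution(inputString):
--     # Four independent one-pass balance checks, one per bracket type (no cross-type matching).
--     for o, c in (("(", ")"), ("{", "}"), ("[", "]"), ("<", ">")):
--         bal = 0
--         for ch in inputString:
--             if ch == o: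
--                 bal += 1
--             elif ch == c:
--                 if bal == 0:
--                     return -1
--                 bal -= 1
--     return sum(1 for ch in inputString if ch in ")}]>")
-- ===== Notes on version B (the rewrite author's own statement) =====
-- stated objective: alternative
-- what changed: Replaces the single pass with four character stacks by four independent integer-balance passes (one per bracket type) plus a final count of closing brackets; no stacks or per-step answer accumulation are kept.
import Mathlib
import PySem

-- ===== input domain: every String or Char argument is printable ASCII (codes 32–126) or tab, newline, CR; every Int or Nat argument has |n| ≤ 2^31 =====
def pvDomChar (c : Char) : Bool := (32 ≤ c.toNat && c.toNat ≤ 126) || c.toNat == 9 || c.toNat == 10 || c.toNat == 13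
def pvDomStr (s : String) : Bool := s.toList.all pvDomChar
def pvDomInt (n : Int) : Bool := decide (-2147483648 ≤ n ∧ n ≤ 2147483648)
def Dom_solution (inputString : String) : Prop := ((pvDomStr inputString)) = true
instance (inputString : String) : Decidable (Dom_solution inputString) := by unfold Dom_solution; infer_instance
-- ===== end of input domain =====

-- B replaces A's single four-stack pass by four independent per-type integer-balance passes
-- plus a final count of closing brackets; equivalence of the return values is proved on all inputs.


-- ===== PORT A =====
-- the loop over range(len(inputString)) with answer and the four stacks as state
def goA : List Char → Int → List Char → List Char → List Char → List Char → Int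
  | [], ans, _, _, _, _ => ans
  | ch :: rest, ans, s1, s2, s3, s4 =>
    if ch = '(' then goA rest ans ('(' :: s1) s2 s3 s4
    else if ch = ')' then
      match s1 with
      | [] => -1
      | _ :: t => goA rest (ans + 1) t s2 s3 s4
    else if ch = '{' then goA rest ans s1 ('{' :: s2) s3 s4
    else if ch = '}' then
      match s2 with
      | [] => -1
      | _ :: t => goA rest (ans + 1) s1 t s3 s4
    else if ch = '[' then goA rest ans s1 s2 ('[' :: s3) s4
    else if ch = ']' then
      match s3 with
      | [] => -1
      | _ :: t => goA rest (ans + 1) s1 s2 t s4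
    else if ch = '<' then goA rest ans s1 s2 s3 ('<' :: s4)
    else if ch = '>' then
      match s4 with
      | [] => -1
      | _ :: t => goA rest (ans + 1) s1 s2 s3 t
    else goA rest ans s1 s2 s3 s4

def solution (inputString : String) : Int :=
  goA inputString.toList 0 [] [] [] []

-- ===== PORT B =====
-- one balance pass for the pair (o, c): True unless some closer is seen with balance 0
def goB (o c : Char) : List Char → Int → Bool
  | [], _ => true
  | ch :: rest, bal =>
    if ch = o then goB o c rest (bal + 1)
    else if ch = c then
      if bal = 0 then false else goB o c rest (bal - 1)
    else goB o c rest bal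

def isCloser (ch : Char) : Bool := ch = ')' || ch = '}' || ch = ']' || ch = '>'

def solution_alt (inputString : String) : Int :=
  if goB '(' ')' inputString.toList 0 then
    if goB '{' '}' inputString.toList 0 then
      if goB '[' ']' inputString.toList 0 then
        if goB '<' '>' inputString.toList 0 then
          ((inputString.toList.filter isCloser).length : Int)
        else -1
      else -1
    else -1
  else -1

-- ===== PRECONDITION & SPEC =====
def Spec_solution (inputString : String) (out : Int) : Prop := out = solution_alt inputString
instance (inputString : String) (out : Int) : Decidable (Spec_solution inputString out) := by unfold Spec_solution; infer_instance

-- ===== CLAIM (what is proved, stated in full; the proofs are below) =====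
def Claim_equal_solution : Prop := ∀ (inputString : String), Dom_solution inputString → Spec_solution inputString (solution inputString)

-- ===== LEMMAS AND PROOFS =====

theorem goA_eq_goB : ∀ (l : List Char) (ans : Int) (s1 s2 s3 s4 : List Char),
    goA l ans s1 s2 s3 s4 =
      if goB '(' ')' l (s1.length : Int) then
        if goB '{' '}' l (s2.length : Int) then
          if goB '[' ']' l (s3.length : Int) then
            if goB '<' '>' l (s4.length : Int) then
              ans + ((l.filter isCloser).length : Int)
            else -1
          else -1
        else -1
      else -1 := by
  intro l
  induction l with
  | nil => intro ans s1 s2 s3 s4; simp [goA, goB]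
  | cons ch rest ih =>
    intro ans s1 s2 s3 s4
    by_cases h1 : ch = '('
    · subst h1
      simp only [goA, goB, Char.reduceEq, reduceIte]
      rw [ih]
      simp only [List.length_cons, List.filter_cons]
      push_cast
      simp [isCloser]
    · by_cases h2 : ch = ')'
      · subst h2
        cases s1 with
        | nil => simp [goA, goB, Char.reduceEq]
        | cons hd t =>
          simp only [goA, goB, Char.reduceEq, reduceIte]
          rw [ih]
          have hne : ((t.length : Int) + 1) ≠ 0 := by positivity
          simp [isCloser, hne, List.length_cons]
          split_ifs <;> ring
      · 
        by_cases h3 : ch = '{'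
        · subst h3
          simp only [goA, goB, Char.reduceEq, reduceIte]
          rw [ih]
          simp only [List.length_cons, List.filter_cons]
          push_cast
          simp [isCloser]
        · by_cases h4 : ch = '}'
          · subst h4
            cases s2 with
            | nil => simp [goA, goB, Char.reduceEq]
            | cons hd t =>
              simp only [goA, goB, Char.reduceEq, reduceIte]
              rw [ih]
              have hne : ((t.length : Int) + 1) ≠ 0 := by positivity
              simp [isCloser, hne, List.length_cons]
              split_ifs <;> ring
          · 
            by_cases h5 : ch = '['
            · subst h5
              simp only [goA, goB, Char.reduceEq, reduceIte]
              rw [ih]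
              simp only [List.length_cons, List.filter_cons]
              push_cast
              simp [isCloser]
            · by_cases h6 : ch = ']'
              · subst h6
                cases s3 with
                | nil => simp [goA, goB, Char.reduceEq]
                | cons hd t =>
                  simp only [goA, goB, Char.reduceEq, reduceIte]
                  rw [ih]
                  have hne : ((t.length : Int) + 1) ≠ 0 := by positivity
                  simp [isCloser, hne, List.length_cons]
                  split_ifs <;> ring
              · 
                by_cases h7 : ch = '<'
                · subst h7
                  simp only [goA, goB, Char.reduceEq, reduceIte]
                  rw [ih]
                  simp only [List.length_cons, List.filter_cons]
                  push_cast
                  simp [isCloser]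
                · by_cases h8 : ch = '>'
                  · subst h8
                    cases s4 with
                    | nil => simp [goA, goB, Char.reduceEq]
                    | cons hd t =>
                      simp only [goA, goB, Char.reduceEq, reduceIte]
                      rw [ih]
                      have hne : ((t.length : Int) + 1) ≠ 0 := by positivity
                      simp [isCloser, hne, List.length_cons]
                      split_ifs <;> ring
                  · 
                    simp only [goA, goB, if_neg h1, if_neg h2, if_neg h3, if_neg h4,
                      if_neg h5, if_neg h6, if_neg h7, if_neg h8]
                    rw [ih]
                    have hcl : isCloser ch = false := by
                      simp [isCloser, h2, h4, h6, h8]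
                    simp [hcl]

-- ===== VERDICT (by name: the statement is the Claim_ definition above) =====
theorem solution_spec : Claim_equal_solution := by
  intro s _
  unfold Spec_solution solution solution_alt
  rw [goA_eq_goB]
  simp
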